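-- pv_equiv track=rewrite | github.com/Tomas-Tamantini/advent-of-code-python | models/aoc_2018/a2018_d5.py | polymer_reaction
-- ===== SOURCE A (Python) =====
-- def _same_type_and_opposing_polarity(chr_a: chr, chr_b: chr) -> bool:
--     return abs(ord(chr_a) - ord(chr_b)) == 32
--
-- def polymer_reaction(polymer: str) -> str:
--     current_polymer = polymer
--     pointer = 0
--     while pointer < len(current_polymer) - 1:
--         if _same_type_and_opposing_polarity(
--             current_polymer[pointer], current_polymer[pointer + 1]
--         ):
--             current_polymer = current_polymer[:pointer] + current_polymer[pointer + 2 :]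
--             if pointer > 0:
--                 pointer -= 1
--         else:
--             pointer += 1
--     return current_polymer
-- ===== SOURCE B (Python) =====
-- def polymer_reaction(polymer: str) -> str:
--     stack = []
--     for c in polymer:
--         if stack and abs(ord(stack[-1]) - ord(c)) == 32:
--             stack.pop()
--         else:
--             stack.append(c)
--     return "".join(stack)
-- ===== Notes on version B (the rewrite author's own statement) =====
-- stated objective: faster
-- what changed: Replaced the pointer-rescans-and-string-reslicing loop (each reaction rebuilds the whole string) with a single left-to-right pass maintaining a stack that pops on cancellation.
import Mathlib
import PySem

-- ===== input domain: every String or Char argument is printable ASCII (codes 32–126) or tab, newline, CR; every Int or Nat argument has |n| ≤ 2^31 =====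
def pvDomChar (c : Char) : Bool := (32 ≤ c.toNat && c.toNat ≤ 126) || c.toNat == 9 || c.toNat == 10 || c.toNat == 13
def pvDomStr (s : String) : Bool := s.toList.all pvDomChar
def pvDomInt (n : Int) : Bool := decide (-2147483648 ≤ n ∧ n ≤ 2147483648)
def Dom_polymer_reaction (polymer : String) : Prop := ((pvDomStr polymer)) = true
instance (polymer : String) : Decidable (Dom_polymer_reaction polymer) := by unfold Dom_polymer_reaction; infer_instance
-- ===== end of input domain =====

-- B replaces A's pointer-and-reslice loop with a single stack pass (pop on cancellation).

-- ===== PORT A =====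
-- abs(ord(a) - ord(b)) == 32
def pvCancel (a b : Char) : Bool := ((a.toNat : Int) - (b.toNat : Int)).natAbs == 32

-- the while loop of A: state = (current_polymer, pointer); string slicing done on List Char
-- fuel only makes the loop total: 2 * len + 1 steps always suffice (pvALoop_eq uses the bound)
def pvALoop (fuel : Nat) (s : List Char) (p : Nat) : List Char :=
  match fuel with
  | 0 => s
  | fuel + 1 =>
    if h : p < s.length - 1 then
      if pvCancel s[p] s[p + 1] then
        pvALoop fuel (s.take p ++ s.drop (p + 2)) (if p > 0 then p - 1 else p)
      else
        pvALoop fuel s (p + 1)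
    else s

def polymer_reaction (polymer : String) : String :=
  String.ofList (pvALoop (2 * polymer.toList.length + 1) polymer.toList 0)

-- ===== PORT B =====
-- one step of B's for-loop: pop if the top of the stack cancels with c, else push
def pvBStep (st : List Char) (c : Char) : List Char :=
  match st with
  | [] => [c]
  | h :: t => if pvCancel h c then t else c :: h :: t

def polymer_reaction_alt (polymer : String) : String :=
  String.ofList ((polymer.toList.foldl pvBStep []).reverse)

-- ===== PRECONDITION & SPEC =====
def Spec_polymer_reaction (polymer : String) (out : String) : Prop := out = polymer_reaction_alt polymer
instance (polymer : String) (out : String) : Decidable (Spec_polymer_reaction polymer out) := by unfold Spec_polymer_reaction; infer_instance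

-- ===== CLAIM (what is proved, stated in full; the proofs are below) =====
def Claim_equal_polymer_reaction : Prop := ∀ (polymer : String), Dom_polymer_reaction polymer → Spec_polymer_reaction polymer (polymer_reaction polymer)

-- ===== LEMMAS AND PROOFS =====

-- invariant of A's loop: no reacting pair strictly before the pointer
def pvIrr (s : List Char) (p : Nat) : Prop :=
  ∀ i, (h : i + 1 < s.length) → i < p → pvCancel s[i] s[i + 1] = false

theorem pvTake_add_one (s : List Char) (p : Nat) (hp : p < s.length) :
    s.take (p + 1) = s.take p ++ [s[p]] := by
  rw [List.take_add_one, List.getElem?_eq_getElem hp]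
  rfl

-- pushing s[p] onto the stack holding the reversed irreducible prefix extends the prefix
theorem pvBStep_push (s : List Char) (p : Nat) (hp : p < s.length)
    (hirr : pvIrr s p) :
    pvBStep ((s.take p).reverse) s[p] = (s.take (p + 1)).reverse := by
  rcases Nat.eq_zero_or_pos p with h0 | h0
  · subst h0
    rw [pvTake_add_one s 0 hp]
    simp [pvBStep]
  · have hp1 : p - 1 + 1 = p := by omega
    have htake : s.take p = s.take (p - 1) ++ [s[p - 1]] := by
      conv_lhs => rw [← hp1]
      exact pvTake_add_one s (p - 1) (by omega)
    have hnc : pvCancel s[p - 1] s[p] = false := by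
      have := hirr (p - 1) (by omega) (by omega)
      simpa [hp1] using this
    rw [pvTake_add_one s p hp, htake]
    simp only [List.reverse_append, List.reverse_cons, List.reverse_nil, List.nil_append,
      List.cons_append, pvBStep, hnc]
    simp

-- an element of the spliced list before the cut point is the original element
theorem pvGet_splice (s : List Char) (p i : Nat) (hp : p ≤ s.length) (hi : i < p)
    (h : i < (s.take p ++ s.drop (p + 2)).length) :
    (s.take p ++ s.drop (p + 2))[i] = s[i]'(by omega) := by
  rw [List.getElem_append_left (by simp [List.length_take]; omega)]
  simp [List.getElem_take]

-- main invariant: A's loop from state (s, p) computes what B's stack pass computes,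
-- provided the prefix before the pointer is irreducible
theorem pvALoop_eq (fuel : Nat) (s : List Char) (p : Nat) (hf : 2 * s.length - p < fuel)
    (hp : p ≤ s.length) (hirr : pvIrr s p) :
    pvALoop fuel s p = (List.foldl pvBStep ((s.take p).reverse) (s.drop p)).reverse := by
  induction fuel generalizing s p with
  | zero => omega
  | succ fuel ih => ?_
  rw [pvALoop]
  split
  · rename_i hlt
    split
    · rename_i hc
      -- reaction: remove s[p], s[p+1]; the two foldl steps push then pop, cancelling out
      have hp1 : p + 1 < s.length := by omega
      have hps : p < s.length := by omega
      have hdrop : s.drop p = s[p] :: s[p + 1] :: s.drop (p + 2) := by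
        rw [List.drop_eq_getElem_cons hps, List.drop_eq_getElem_cons hp1]
      have hfold2 : List.foldl pvBStep ((s.take p).reverse) (s.drop p)
          = List.foldl pvBStep ((s.take p).reverse) (s.drop (p + 2)) := by
        rw [hdrop]
        simp only [List.foldl_cons]
        rw [pvBStep_push s p hps hirr, pvTake_add_one s p hps]
        simp only [List.reverse_append, List.reverse_cons, List.reverse_nil, List.nil_append,
          List.cons_append, pvBStep, hc]
        simp
      have hlen' : (s.take p ++ s.drop (p + 2)).length = s.length - 2 := by
        simp only [List.length_append, List.length_take, List.length_drop]
        omega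
      rcases Nat.eq_zero_or_pos p with h0 | h0
      · -- pointer stays at 0
        subst h0
        rw [if_neg (by omega)]
        rw [ih (s.take 0 ++ s.drop (0 + 2)) 0
          (by simp only [List.length_append, List.length_take, List.length_drop]; omega)
          (by omega) (by intro i h hi; omega)]
        simp only [List.take_zero, List.reverse_nil, List.nil_append, List.drop_zero] at *
        rw [hfold2]
      · -- pointer steps back to p - 1
        rw [if_pos h0]
        have hirr' : pvIrr (s.take p ++ s.drop (p + 2)) (p - 1) := by
          intro i h hi
          rw [pvGet_splice s p i (by omega) (by omega),
            pvGet_splice s p (i + 1) (by omega) (by omega)]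
          exact hirr i (by omega) (by omega)
        rw [ih (s.take p ++ s.drop (p + 2)) (p - 1) (by omega) (by omega) hirr']
        have htake' : (s.take p ++ s.drop (p + 2)).take (p - 1) = s.take (p - 1) := by
          rw [List.take_append_of_le_length (by simp [List.length_take]; omega),
            List.take_take]
          congr 1; omega
        have hdrop' : (s.take p ++ s.drop (p + 2)).drop (p - 1)
            = s[p - 1] :: s.drop (p + 2) := by
          rw [List.drop_append_of_le_length (by simp [List.length_take]; omega),
            List.drop_take]
          have h1 : p - (p - 1) = 1 := by omega
          rw [h1, List.take_one_drop_eq_of_lt_length (by omega : p - 1 < s.length)]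
          simp
        rw [htake', hdrop', hfold2]
        simp only [List.foldl_cons]
        have hpush := pvBStep_push s (p - 1) (by omega)
          (by intro i h hi; exact hirr i h (by omega))
        rw [hpush]
        have hp1' : p - 1 + 1 = p := by omega
        rw [hp1']
    · rename_i hc
      -- no reaction: advance the pointer
      have hps : p < s.length := by omega
      have hirr' : pvIrr s (p + 1) := by
        intro i h hi
        rcases Nat.lt_or_ge i p with hi' | hi'
        · exact hirr i h hi'
        · have : i = p := by omega
          subst this
          simpa using (Bool.not_eq_true _).mp hc
      rw [ih s (p + 1) (by omega) (by omega) hirr']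
      rw [List.drop_eq_getElem_cons hps]
      simp only [List.foldl_cons]
      rw [pvBStep_push s p hps hirr]
  · rename_i hge
    -- pointer reached the end: s is fully irreducible, the stack pass returns it unchanged
    rcases Nat.lt_or_ge p s.length with hps | hps
    · rw [List.drop_eq_getElem_cons hps,
        List.drop_eq_nil_of_le (by omega : s.length ≤ p + 1)]
      simp only [List.foldl_cons, List.foldl_nil]
      rw [pvBStep_push s p hps hirr, List.take_of_length_le (by omega : s.length ≤ p + 1),
        List.reverse_reverse]
    · rw [List.take_of_length_le hps, List.drop_eq_nil_of_le hps]
      simp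

-- ===== VERDICT (by name: the statement is the Claim_ definition above) =====
theorem polymer_reaction_spec : Claim_equal_polymer_reaction := by
  intro polymer _
  unfold Spec_polymer_reaction polymer_reaction polymer_reaction_alt
  rw [pvALoop_eq (2 * polymer.toList.length + 1) polymer.toList 0 (by omega) (by omega)
    (by intro i h hi; omega)]
  simp
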